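-- pv_equiv track=rewrite | github.com/aandradepersonal-aurumsci/aurumsci | app/motor/calculos.py | classificar_flexao
-- ===== SOURCE A (Python) =====
-- def classificar_flexao(repeticoes: int, sexo: str, idade: int) -> str:
--     """
--     Classificação do teste de flexão de braço
--     Canadian Society for Exercise Physiology
--     """
--     if sexo == "masculino":
--         if idade < 30:
--             tabela = [(15, "Muito fraco"), (24, "Fraco"), (34, "Regular"), (44, "Bom"), (54, "Excelente"), (999, "Superior")]
--         elif idade < 40:
--             tabela = [(10, "Muito fraco"), (19, "Fraco"), (29, "Regular"), (39, "Bom"), (49, "Excelente"), (999, "Superior")]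
--         else:
--             tabela = [(8, "Muito fraco"), (14, "Fraco"), (24, "Regular"), (34, "Bom"), (44, "Excelente"), (999, "Superior")]
--     else:
--         if idade < 30:
--             tabela = [(7, "Muito fraco"), (14, "Fraco"), (20, "Regular"), (29, "Bom"), (35, "Excelente"), (999, "Superior")]
--         elif idade < 40:
--             tabela = [(5, "Muito fraco"), (11, "Fraco"), (17, "Regular"), (24, "Bom"), (30, "Excelente"), (999, "Superior")]
--         else:
--             tabela = [(2, "Muito fraco"), (8, "Fraco"), (14, "Regular"), (21, "Bom"), (27, "Excelente"), (999, "Superior")]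
--
--     for limite, cls in tabela:
--         if repeticoes <= limite:
--             return cls
--     return "Regular"
-- ===== SOURCE B (Python) =====
-- def classificar_flexao(repeticoes: int, sexo: str, idade: int) -> str:
--     """
--     Classificação do teste de flexão de braço
--     Canadian Society for Exercise Physiology
--     """
--     if sexo == "masculino":
--         if idade < 30:
--             limits = [15, 24, 34, 44, 54, 999]
--         elif idade < 40:
--             limits = [10, 19, 29, 39, 49, 999]
--         else:
--             limits = [8, 14, 24, 34, 44, 999]
--     else:
--         if idade < 30:
--             limits = [7, 14, 20, 29, 35, 999]
--         elif idade < 40: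
--             limits = [5, 11, 17, 24, 30, 999]
--         else:
--             limits = [2, 8, 14, 21, 27, 999]
--     names = ["Muito fraco", "Fraco", "Regular", "Bom", "Excelente", "Superior"]
--     # binary search: first index with limits[idx] >= repeticoes (bisect_left)
--     lo, hi = 0, len(limits)
--     while lo < hi:
--         mid = (lo + hi) // 2
--         if limits[mid] < repeticoes:
--             lo = mid + 1
--         else:
--             hi = mid
--     return names[lo] if lo < len(names) else "Regular"
-- ===== Notes on version B (the rewrite author's own statement) =====
-- stated objective: alternative
-- what changed: Replaces the linear scan over (limit, name) pairs with a bisect_left-style binary search over a sorted limits array paired with a single shared names array (the class names are identical in all six tables), keeping the 'Regular' fallback for indices past the table.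
import Mathlib
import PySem

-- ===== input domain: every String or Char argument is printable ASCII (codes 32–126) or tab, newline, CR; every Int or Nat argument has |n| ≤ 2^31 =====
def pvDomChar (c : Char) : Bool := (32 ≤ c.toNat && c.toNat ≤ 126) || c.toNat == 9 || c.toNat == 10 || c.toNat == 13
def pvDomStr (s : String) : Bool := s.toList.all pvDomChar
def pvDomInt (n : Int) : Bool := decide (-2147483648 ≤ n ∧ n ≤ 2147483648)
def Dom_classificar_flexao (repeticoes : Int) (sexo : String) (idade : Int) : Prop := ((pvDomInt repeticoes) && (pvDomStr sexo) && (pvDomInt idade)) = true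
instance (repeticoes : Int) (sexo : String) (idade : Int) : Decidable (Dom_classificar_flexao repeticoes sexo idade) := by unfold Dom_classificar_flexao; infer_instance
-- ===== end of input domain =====

-- B replaces A's linear threshold scan over (limit, name) pairs by a binary search
-- (bisect_left) over a sorted limits array with a shared names array; same value everywhere.

-- ===== PORT A =====
-- the 'for limite, cls in tabela: if repeticoes <= limite: return cls' loop, with its fallback
def pvScanA : List (Int × String) → Int → String
  | [], _ => "Regular"
  | (limite, cls) :: t, repeticoes =>
    if repeticoes ≤ limite then cls else pvScanA t repeticoes

def classificar_flexao (repeticoes : Int) (sexo : String) (idade : Int) : String :=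
  let tabela : List (Int × String) :=
    if sexo = "masculino" then
      if idade < 30 then
        [(15, "Muito fraco"), (24, "Fraco"), (34, "Regular"), (44, "Bom"), (54, "Excelente"), (999, "Superior")]
      else if idade < 40 then
        [(10, "Muito fraco"), (19, "Fraco"), (29, "Regular"), (39, "Bom"), (49, "Excelente"), (999, "Superior")]
      else
        [(8, "Muito fraco"), (14, "Fraco"), (24, "Regular"), (34, "Bom"), (44, "Excelente"), (999, "Superior")]
    else
      if idade < 30 then
        [(7, "Muito fraco"), (14, "Fraco"), (20, "Regular"), (29, "Bom"), (35, "Excelente"), (999, "Superior")]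
      else if idade < 40 then
        [(5, "Muito fraco"), (11, "Fraco"), (17, "Regular"), (24, "Bom"), (30, "Excelente"), (999, "Superior")]
      else
        [(2, "Muito fraco"), (8, "Fraco"), (14, "Regular"), (21, "Bom"), (27, "Excelente"), (999, "Superior")]
  pvScanA tabela repeticoes

-- ===== PORT B =====
-- the 'while lo < hi' bisect_left loop from Source B, recursion on the shrinking interval
def pvBisect (limits : List Int) (x : Int) (lo hi : Nat) : Nat :=
  if _h : lo < hi then
    let mid := (lo + hi) / 2
    if limits.getD mid 0 < x then pvBisect limits x (mid + 1) hi
    else pvBisect limits x lo mid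
  else lo
termination_by hi - lo
decreasing_by all_goals omega

def classificar_flexao_alt (repeticoes : Int) (sexo : String) (idade : Int) : String :=
  let limits : List Int :=
    if sexo = "masculino" then
      if idade < 30 then [15, 24, 34, 44, 54, 999]
      else if idade < 40 then [10, 19, 29, 39, 49, 999]
      else [8, 14, 24, 34, 44, 999]
    else
      if idade < 30 then [7, 14, 20, 29, 35, 999]
      else if idade < 40 then [5, 11, 17, 24, 30, 999]
      else [2, 8, 14, 21, 27, 999]
  let names : List String := ["Muito fraco", "Fraco", "Regular", "Bom", "Excelente", "Superior"]
  let lo := pvBisect limits repeticoes 0 limits.length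
  if lo < names.length then names.getD lo "Regular" else "Regular"

-- ===== PRECONDITION & SPEC =====
def Spec_classificar_flexao (repeticoes : Int) (sexo : String) (idade : Int) (out : String) : Prop := out = classificar_flexao_alt repeticoes sexo idade
instance (repeticoes : Int) (sexo : String) (idade : Int) (out : String) : Decidable (Spec_classificar_flexao repeticoes sexo idade out) := by unfold Spec_classificar_flexao; infer_instance

-- ===== CLAIM (what is proved, stated in full; the proofs are below) =====
def Claim_equal_classificar_flexao : Prop := ∀ (repeticoes : Int) (sexo : String) (idade : Int), Dom_classificar_flexao repeticoes sexo idade → Spec_classificar_flexao repeticoes sexo idade (classificar_flexao repeticoes sexo idade)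

-- ===== LEMMAS AND PROOFS =====
-- closed form of the 6-element bisect_left, obtained by unrolling the three binary-search steps
theorem pvBisect_closed (a b c d e f x : Int) :
    pvBisect [a, b, c, d, e, f] x 0 6 =
      if d < x then (if f < x then 6 else if e < x then 5 else 4)
      else if b < x then (if c < x then 3 else 2)
      else if a < x then 1 else 0 := by
  rw [pvBisect]; norm_num [List.getD]
  split_ifs <;> simp_all [pvBisect, List.getD] <;> split_ifs <;> omega

-- B's index-to-name lookup composed with the closed-form bisect, as a decision tree on x
theorem pvAlt_closed (a b c d e f x : Int) :
    (if pvBisect [a, b, c, d, e, f] x 0 6 < 6 then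
      (["Muito fraco", "Fraco", "Regular", "Bom", "Excelente", "Superior"] : List String).getD
        (pvBisect [a, b, c, d, e, f] x 0 6) "Regular"
    else "Regular")
    = if d < x then (if f < x then "Regular" else if e < x then "Superior" else "Excelente")
      else if b < x then (if c < x then "Bom" else "Regular")
      else if a < x then "Fraco" else "Muito fraco" := by
  rw [pvBisect_closed]
  split_ifs <;> simp_all [List.getD]

theorem pvTbl1 (r : Int) : pvScanA [(15, "Muito fraco"), (24, "Fraco"), (34, "Regular"), (44, "Bom"), (54, "Excelente"), (999, "Superior")] r =
    (if pvBisect [15, 24, 34, 44, 54, 999] r 0 6 < 6 then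
      (["Muito fraco", "Fraco", "Regular", "Bom", "Excelente", "Superior"] : List String).getD
        (pvBisect [15, 24, 34, 44, 54, 999] r 0 6) "Regular"
    else "Regular") := by
  rw [pvAlt_closed]
  simp only [pvScanA]
  split_ifs <;> first | rfl | omega

theorem pvTbl2 (r : Int) : pvScanA [(10, "Muito fraco"), (19, "Fraco"), (29, "Regular"), (39, "Bom"), (49, "Excelente"), (999, "Superior")] r =
    (if pvBisect [10, 19, 29, 39, 49, 999] r 0 6 < 6 then
      (["Muito fraco", "Fraco", "Regular", "Bom", "Excelente", "Superior"] : List String).getD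
        (pvBisect [10, 19, 29, 39, 49, 999] r 0 6) "Regular"
    else "Regular") := by
  rw [pvAlt_closed]
  simp only [pvScanA]
  split_ifs <;> first | rfl | omega

theorem pvTbl3 (r : Int) : pvScanA [(8, "Muito fraco"), (14, "Fraco"), (24, "Regular"), (34, "Bom"), (44, "Excelente"), (999, "Superior")] r =
    (if pvBisect [8, 14, 24, 34, 44, 999] r 0 6 < 6 then
      (["Muito fraco", "Fraco", "Regular", "Bom", "Excelente", "Superior"] : List String).getD
        (pvBisect [8, 14, 24, 34, 44, 999] r 0 6) "Regular"
    else "Regular") := by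
  rw [pvAlt_closed]
  simp only [pvScanA]
  split_ifs <;> first | rfl | omega

theorem pvTbl4 (r : Int) : pvScanA [(7, "Muito fraco"), (14, "Fraco"), (20, "Regular"), (29, "Bom"), (35, "Excelente"), (999, "Superior")] r =
    (if pvBisect [7, 14, 20, 29, 35, 999] r 0 6 < 6 then
      (["Muito fraco", "Fraco", "Regular", "Bom", "Excelente", "Superior"] : List String).getD
        (pvBisect [7, 14, 20, 29, 35, 999] r 0 6) "Regular"
    else "Regular") := by
  rw [pvAlt_closed]
  simp only [pvScanA]
  split_ifs <;> first | rfl | omega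

theorem pvTbl5 (r : Int) : pvScanA [(5, "Muito fraco"), (11, "Fraco"), (17, "Regular"), (24, "Bom"), (30, "Excelente"), (999, "Superior")] r =
    (if pvBisect [5, 11, 17, 24, 30, 999] r 0 6 < 6 then
      (["Muito fraco", "Fraco", "Regular", "Bom", "Excelente", "Superior"] : List String).getD
        (pvBisect [5, 11, 17, 24, 30, 999] r 0 6) "Regular"
    else "Regular") := by
  rw [pvAlt_closed]
  simp only [pvScanA]
  split_ifs <;> first | rfl | omega

theorem pvTbl6 (r : Int) : pvScanA [(2, "Muito fraco"), (8, "Fraco"), (14, "Regular"), (21, "Bom"), (27, "Excelente"), (999, "Superior")] r =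
    (if pvBisect [2, 8, 14, 21, 27, 999] r 0 6 < 6 then
      (["Muito fraco", "Fraco", "Regular", "Bom", "Excelente", "Superior"] : List String).getD
        (pvBisect [2, 8, 14, 21, 27, 999] r 0 6) "Regular"
    else "Regular") := by
  rw [pvAlt_closed]
  simp only [pvScanA]
  split_ifs <;> first | rfl | omega

-- ===== VERDICT (by name: the statement is the Claim_ definition above) =====
theorem classificar_flexao_spec : Claim_equal_classificar_flexao := by
  intro r s i _
  unfold Spec_classificar_flexao classificar_flexao classificar_flexao_alt
  split_ifs <;>
    first | exact pvTbl1 r | exact pvTbl2 r | exact pvTbl3 r |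
            exact pvTbl4 r | exact pvTbl5 r | exact pvTbl6 r
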